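-- pv_equiv track=rewrite | github.com/Yawn-Sean/Daily_CF_Problems | daily_problems/2025/07/0726/personal_submission/cf825c_liryc.py | solve
-- ===== SOURCE A (Python) =====
-- def solve(n: int, k: int, a: list[int]) -> int:
--     ans = 0
--     a.sort()
--     for x in a:
--         if x > k:
--             while x > k << 1:
--                 ans += 1
--                 k <<= 1
--             if x > k:
--                 k = x
--     return ans
-- ===== SOURCE B (Python) =====
-- def solve(n: int, k: int, a: list[int]) -> int:
--     # Closed form: replaces A's inner doubling while-loop by a bit_length formula.
--     ans = 0
--     a.sort()
--     for x in a:
--         if x > k: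
--             ans += ((x - 1) // k).bit_length() - 1
--             k = x
--     return ans
-- ===== Notes on version B (the rewrite author's own statement) =====
-- stated objective: simpler
-- what changed: Replaces A's inner while-loop that repeatedly doubles k with the closed form ((x-1)//k).bit_length() - 1 added once per element, so the loop body has no inner iteration.
import Mathlib
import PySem

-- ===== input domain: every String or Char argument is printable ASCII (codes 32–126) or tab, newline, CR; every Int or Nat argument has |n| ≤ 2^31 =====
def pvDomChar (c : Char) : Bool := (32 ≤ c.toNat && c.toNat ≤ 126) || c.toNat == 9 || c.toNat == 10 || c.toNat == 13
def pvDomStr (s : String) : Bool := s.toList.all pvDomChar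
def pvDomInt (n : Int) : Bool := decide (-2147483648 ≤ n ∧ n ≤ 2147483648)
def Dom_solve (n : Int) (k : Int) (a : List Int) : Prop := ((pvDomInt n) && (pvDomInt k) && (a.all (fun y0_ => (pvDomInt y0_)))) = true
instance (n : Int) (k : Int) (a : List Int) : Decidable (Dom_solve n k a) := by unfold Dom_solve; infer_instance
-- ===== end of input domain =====

-- B replaces A's inner doubling while-loop by a closed-form bit_length count (simpler);
-- A mutates `a` by sorting it in place and B does the same, the theorems are about the return value.

-- ===== PORT A =====
-- the `while x > k << 1: ans += 1; k <<= 1` loop; fuel 64 suffices on the domain (|x| ≤ 2^31, 1 ≤ k)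
def solveWhile : Nat → Int → Int → Int → Int × Int
  | 0, _, k, ans => (k, ans)
  | f+1, x, k, ans => if x > k * 2 then solveWhile f x (k * 2) (ans + 1) else (k, ans)

def solveStepA (st : Int × Int) (x : Int) : Int × Int :=
  if x > st.1 then
    let p := solveWhile 64 x st.1 st.2
    if x > p.1 then (x, p.2) else p
  else st

def solve (n : Int) (k : Int) (a : List Int) : Int :=
  ((PySem.List.sorted a (fun x => x) false).foldl solveStepA (k, 0)).2

-- ===== PORT B =====
def solveStepB (st : Int × Int) (x : Int) : Int × Int :=
  if x > st.1 then
    (x, st.2 + ((PySem.Int.bitLength (PySem.Int.floordiv (x - 1) st.1) : Int) - 1))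
  else st

def solve_alt (n : Int) (k : Int) (a : List Int) : Int :=
  ((PySem.List.sorted a (fun x => x) false).foldl solveStepB (k, 0)).2

-- ===== PRECONDITION & SPEC =====
-- Pre_ excludes the inputs where A never returns: with k ≤ 0 and some element above k,
-- A's `k <<= 1` loop runs forever (ZeroDivisionError-free infinite loop), so A raises nothing but diverges.
def Pre_solve (n : Int) (k : Int) (a : List Int) : Prop := 1 ≤ k ∨ ∀ x ∈ a, x ≤ k
instance (n : Int) (k : Int) (a : List Int) : Decidable (Pre_solve n k a) := by unfold Pre_solve; infer_instance
def pvWitness_solve : Int × Int × List Int := (3, 1, [5, 2, 17])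

def Spec_solve (n : Int) (k : Int) (a : List Int) (out : Int) : Prop := out = solve_alt n k a
instance (n : Int) (k : Int) (a : List Int) (out : Int) : Decidable (Spec_solve n k a out) := by unfold Spec_solve; infer_instance

-- ===== CLAIM (what is proved, stated in full; the proofs are below) =====
def Claim_equal_solve : Prop := ∀ (n : Int) (k : Int) (a : List Int), Dom_solve n k a → Pre_solve n k a → Spec_solve n k a (solve n k a)

-- ===== LEMMAS AND PROOFS =====

-- (a // b) // 2 = a // (2b) for positive b
theorem floordiv_floordiv_two (a b : Int) (hb : 0 < b) :
    PySem.Int.floordiv (PySem.Int.floordiv a b) 2 = PySem.Int.floordiv a (b * 2) := by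
  rw [PySem.Int.floordiv_eq_ediv_of_pos hb, PySem.Int.floordiv_eq_ediv_of_pos (by norm_num : (0:Int) < 2),
      PySem.Int.floordiv_eq_ediv_of_pos (by positivity : (0:Int) < b * 2)]
  exact Int.ediv_ediv_eq_ediv_mul hb.le

-- the while-loop computes the closed form: it ends below x, having added bit_length((x-1)//k) - 1
theorem solveWhile_spec (x : Int) : ∀ (f : Nat) (k ans : Int), 1 ≤ k → k < x → x ≤ 2 ^ f * k →
    (solveWhile f x k ans).1 < x ∧
    (solveWhile f x k ans).2 = ans + ((PySem.Int.bitLength (PySem.Int.floordiv (x - 1) k) : Int) - 1) := by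
  intro f
  induction f with
  | zero => intro k ans hk hkx hbound; simp at hbound; omega
  | succ f ih =>
    intro k ans hk hkx hbound
    by_cases h : x > k * 2
    · have hrec := ih (k * 2) (ans + 1) (by omega) h (by rw [pow_succ] at hbound; linarith)
      simp only [solveWhile, if_pos h]
      refine ⟨hrec.1, ?_⟩
      rw [hrec.2]
      have hm2 : (2 : Int) ≤ PySem.Int.floordiv (x - 1) k := by
        rw [PySem.Int.floordiv_eq_ediv_of_pos (by omega), Int.le_ediv_iff_mul_le (by omega)]
        omega
      have hbl := PySem.Int.bitLength_of_pos (n := PySem.Int.floordiv (x - 1) k) (by omega)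
      rw [floordiv_floordiv_two (x - 1) k (by omega)] at hbl
      rw [hbl]
      push_cast
      ring
    · simp only [solveWhile, if_neg h]
      refine ⟨hkx, ?_⟩
      have h1 : PySem.Int.floordiv (x - 1) k = 1 := by
        rw [PySem.Int.floordiv_eq_iff_of_pos (by omega)]
        constructor <;> omega
      rw [h1]
      have : PySem.Int.bitLength 1 = 1 := by decide
      rw [this]
      omega

-- one step of A's loop body equals one step of B's, for state k ≥ 1 and x within the domain bound
theorem stepA_eq_stepB (k ans x : Int) (hk : 1 ≤ k) (hx : x ≤ 2147483648) :
    solveStepA (k, ans) x = solveStepB (k, ans) x := by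
  unfold solveStepA solveStepB
  by_cases h : x > k
  · simp only [if_pos h]
    have hbound : x ≤ 2 ^ 64 * k := by
      have h1 : (2 : Int) ^ 64 * 1 ≤ 2 ^ 64 * k := by
        apply mul_le_mul_of_nonneg_left hk (by positivity)
      have : (2147483648 : Int) ≤ 2 ^ 64 := by norm_num
      omega
    have hw := solveWhile_spec x 64 k ans hk h hbound
    simp only [if_pos hw.1]
    exact Prod.ext rfl hw.2
  · simp only [if_neg h]

-- fold equivalence under the loop invariant
theorem foldl_eq (l : List Int) : ∀ (k ans : Int),
    (∀ x ∈ l, x ≤ 2147483648) → (1 ≤ k ∨ ∀ x ∈ l, x ≤ k) →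
    l.foldl solveStepA (k, ans) = l.foldl solveStepB (k, ans) := by
  induction l with
  | nil => intro k ans _ _; rfl
  | cons x t ih =>
    intro k ans hdom hpre
    simp only [List.foldl_cons]
    by_cases h : x > k
    · have hk : 1 ≤ k := by
        rcases hpre with hk | hall
        · exact hk
        · exact absurd (hall x (by simp)) (by omega)
      rw [stepA_eq_stepB k ans x hk (hdom x (by simp))]
      have hx1 : (1 : Int) ≤ x := by omega
      unfold solveStepB
      simp only [if_pos h]
      exact ih x _ (fun y hy => hdom y (by simp [hy])) (Or.inl hx1)
    · have hA : solveStepA (k, ans) x = (k, ans) := by unfold solveStepA; simp [h]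
      have hB : solveStepB (k, ans) x = (k, ans) := by unfold solveStepB; simp [h]
      rw [hA, hB]
      apply ih k ans (fun y hy => hdom y (by simp [hy]))
      rcases hpre with hk | hall
      · exact Or.inl hk
      · exact Or.inr (fun y hy => hall y (by simp [hy]))

-- ===== VERDICT (by name: the statement is the Claim_ definition above) =====
theorem solve_spec : Claim_equal_solve := by
  intro n k a hdom hpre
  unfold Spec_solve solve solve_alt
  have hdom' : ∀ x ∈ PySem.List.sorted a (fun x => x) false, x ≤ 2147483648 := by
    intro x hx
    rw [PySem.List.mem_sorted] at hx
    unfold Dom_solve at hdom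
    simp only [Bool.and_eq_true, List.all_eq_true] at hdom
    have := hdom.2 x hx
    simp [pvDomInt] at this
    omega
  have hpre' : 1 ≤ k ∨ ∀ x ∈ PySem.List.sorted a (fun x => x) false, x ≤ k := by
    rcases hpre with hk | hall
    · exact Or.inl hk
    · exact Or.inr (fun x hx => hall x ((PySem.List.mem_sorted a _ false x).mp hx))
  rw [foldl_eq _ k 0 hdom' hpre']
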